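-- pv_equiv track=rewrite | github.com/MrBrantCode/unitest_baseline | mut_generate/mist_train_cf/cf_82994/solution.py | fibonacci_like_sequence
-- ===== SOURCE A (Python) =====
-- def is_prime(n):
--     if n < 2:
--         return False
--     for i in range(2, int(n ** 0.5) + 1):
--         if n % i == 0:
--             return False
--     return True
--
-- def next_prime(n):
--     while True:
--         n += 1
--         if is_prime(n):
--             return n
--
-- def fibonacci_like_sequence(n):
--     base_pair = [n, next_prime(n)]
--     sequence = []
--
--     for i in range(n):
--         if i < len(base_pair):
--             sequence.append(base_pair[i])
--         else:
--             sequence.append(sequence[-1] + sequence[-2])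
--
--     return sequence
-- ===== SOURCE B (Python) =====
-- def is_prime(n):
--     if n < 2:
--         return False
--     for i in range(2, int(n ** 0.5) + 1):
--         if n % i == 0:
--             return False
--     return True
--
-- def next_prime(n):
--     while True:
--         n += 1
--         if is_prime(n):
--             return n
--
-- def fib_pair(k):
--     # fast doubling: returns (F(k), F(k+1)) with F(0)=0, F(1)=1
--     if k == 0:
--         return (0, 1)
--     f, g = fib_pair(k // 2)
--     c = f * (2 * g - f)
--     d = f * f + g * g
--     if k % 2 == 0:
--         return (c, d)
--     return (d, c + d)
--
-- def fibonacci_like_sequence(n):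
--     p = next_prime(n)
--     def term(k):
--         f, g = fib_pair(k)
--         return n * (g - f) + p * f
--     return [term(k) for k in range(n)]
-- ===== Notes on version B (the rewrite author's own statement) =====
-- stated objective: alternative
-- what changed: B computes each term independently by the closed form term(k) = n*(F(k+1)-F(k)) + p*F(k), obtaining the Fibonacci coefficients F(k), F(k+1) via the fast-doubling recursion, instead of running A's forward recurrence that reads sequence[-1]+sequence[-2] off the output list.
import Mathlib
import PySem

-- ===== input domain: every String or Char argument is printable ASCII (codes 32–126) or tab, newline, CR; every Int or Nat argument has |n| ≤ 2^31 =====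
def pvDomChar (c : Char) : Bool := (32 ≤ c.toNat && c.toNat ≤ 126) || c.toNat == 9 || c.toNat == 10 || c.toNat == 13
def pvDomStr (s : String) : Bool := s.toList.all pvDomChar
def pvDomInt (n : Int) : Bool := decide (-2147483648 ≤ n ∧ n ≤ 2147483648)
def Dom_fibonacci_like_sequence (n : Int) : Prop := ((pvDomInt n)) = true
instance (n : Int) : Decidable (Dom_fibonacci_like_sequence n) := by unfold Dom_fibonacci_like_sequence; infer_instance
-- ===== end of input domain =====

-- B replaces A's forward recurrence (sequence[-1]+sequence[-2] read off the output list)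
-- by an independent closed form per term, term k = n*(F(k+1)-F(k)) + p*F(k), with the
-- Fibonacci coefficients computed by the fast-doubling recursion (alternative; same result).

-- ===== PORT A =====
-- int(n ** 0.5) is ported as Nat.sqrt: for |n| ≤ 2^31 the float value int(n**0.5) is
-- Nat.sqrt n or Nat.sqrt n + 1 (rounding at k^2-1); the extra trial divisor i = sqrt+1
-- can never divide n without a smaller witness, so is_prime's result is exact on Dom.
def is_prime (n : Int) : Bool :=
  if n < 2 then false
  else (PySem.List.pyRange 2 ((Nat.sqrt n.toNat : Int) + 1) 1).all
        (fun i => !(PySem.Int.mod n i == 0))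

-- while True: n += 1; if is_prime(n): return n — ported with a fuel counter that merely
-- makes the same search total: by Bertrand's postulate natAbs n + 5 candidates always
-- suffice on Dom, so the fuel-0 fallback is never reached there.
def next_prime_loop (m : Int) : Nat → Int
  | 0 => m
  | fuel + 1 => if is_prime (m + 1) then m + 1 else next_prime_loop (m + 1) fuel

def next_prime (n : Int) : Int := next_prime_loop n (n.natAbs + 5)

-- indices fed to pyGet? below are always in range, so .getD 0 never supplies the default
def fibonacci_like_sequence (n : Int) : List Int :=
  let base_pair : List Int := [n, next_prime n]
  (PySem.List.pyRange 0 n 1).foldl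
    (fun sequence i =>
      if i < (base_pair.length : Int) then
        sequence ++ [(PySem.List.pyGet? base_pair i).getD 0]
      else
        sequence ++ [(PySem.List.pyGet? sequence (-1)).getD 0 +
                     (PySem.List.pyGet? sequence (-2)).getD 0])
    []

-- ===== PORT B =====
-- fast doubling: fib_pair k = (F(k), F(k+1)); Python's k // 2 on the nonnegative k that
-- B ever passes is Nat division, so the argument is taken as a Nat
def fib_pair (k : Nat) : Int × Int :=
  if h : k = 0 then (0, 1)
  else
    let fg := fib_pair (k / 2)
    let c := fg.1 * (2 * fg.2 - fg.1)
    let d := fg.1 * fg.1 + fg.2 * fg.2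
    if k % 2 == 0 then (c, d) else (d, c + d)
decreasing_by exact Nat.div_lt_self (Nat.pos_of_ne_zero h) (by omega)

def fib_term (n p : Int) (k : Nat) : Int :=
  let fg := fib_pair k
  n * (fg.2 - fg.1) + p * fg.1

-- every k produced by range(n) is nonnegative, so k.toNat is exact
def fibonacci_like_sequence_alt (n : Int) : List Int :=
  let p := next_prime n
  (PySem.List.pyRange 0 n 1).map (fun k => fib_term n p k.toNat)

-- ===== PRECONDITION & SPEC =====
def Spec_fibonacci_like_sequence (n : Int) (out : List Int) : Prop := out = fibonacci_like_sequence_alt n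
instance (n : Int) (out : List Int) : Decidable (Spec_fibonacci_like_sequence n out) := by unfold Spec_fibonacci_like_sequence; infer_instance

-- ===== CLAIM (what is proved, stated in full; the proofs are below) =====
def Claim_equal_fibonacci_like_sequence : Prop := ∀ (n : Int), Dom_fibonacci_like_sequence n → Spec_fibonacci_like_sequence n (fibonacci_like_sequence n)

-- ===== LEMMAS AND PROOFS =====

-- the mathematical sequence A's loop generates: t 0 = a, t 1 = b, t (k+2) = t k + t (k+1)
def fibAux (a b : Int) : Nat → Int
  | 0 => a
  | 1 => b
  | (k + 2) => fibAux a b k + fibAux a b (k + 1)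

theorem fibAux_A_fold (a b : Int) : ∀ (m : Nat),
    (List.range m).foldl
      (fun (sequence : List Int) (k : Nat) =>
        if ((k : Int)) < (([a, b] : List Int).length : Int) then
          sequence ++ [(PySem.List.pyGet? [a, b] ((k : Int))).getD 0]
        else
          sequence ++ [(PySem.List.pyGet? sequence (-1)).getD 0 +
                       (PySem.List.pyGet? sequence (-2)).getD 0])
      []
    = (List.range m).map (fibAux a b) := by
  intro m
  induction m with
  | zero => simp
  | succ m ih =>
      rw [List.range_succ, List.foldl_append, ih, List.map_append, List.foldl_cons,
          List.foldl_nil]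
      match m with
      | 0 => simp [PySem.List.pyGet?, PySem.List.pyIdx?, fibAux]
      | 1 => simp [PySem.List.pyGet?, PySem.List.pyIdx?, fibAux]
      | (j + 2) =>
          have hlen : ((List.range (j + 2)).map (fibAux a b)).length = j + 2 := by simp
          have hcond : ¬ ((j + 2 : Nat) : Int) < (([a, b] : List Int).length : Int) := by
            simp; omega
          rw [if_neg hcond]
          have hg1 : (PySem.List.pyGet? ((List.range (j + 2)).map (fibAux a b)) (-1)).getD 0
              = fibAux a b (j + 1) := by
            simp [PySem.List.pyGet?, PySem.List.pyIdx?, hlen, List.getElem?_map]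
          have hg2 : (PySem.List.pyGet? ((List.range (j + 2)).map (fibAux a b)) (-2)).getD 0
              = fibAux a b j := by
            simp [PySem.List.pyGet?, PySem.List.pyIdx?, hlen, List.getElem?_map]
          rw [hg1, hg2]
          have : fibAux a b (j + 1) + fibAux a b j = fibAux a b (j + 2) := by
            show _ = fibAux a b j + fibAux a b (j + 1); ring
          rw [this]; simp

theorem fib_pair_eq : ∀ (k : Nat), fib_pair k = ((Nat.fib k : Int), (Nat.fib (k + 1) : Int)) := by
  intro k
  induction k using Nat.strong_induction_on with
  | _ k ih =>
    rw [fib_pair]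
    by_cases h : k = 0
    · simp [h]
    · simp only [h, dif_neg, not_false_iff]
      rw [ih (k / 2) (Nat.div_lt_self (Nat.pos_of_ne_zero h) (by omega))]
      have hle : Nat.fib (k / 2) ≤ 2 * Nat.fib (k / 2 + 1) :=
        le_trans (Nat.fib_le_fib_succ) (by omega)
      rcases Nat.even_or_odd k with he | ho
      · obtain ⟨m, hm⟩ := he
        have hk2 : k / 2 = m := by omega
        have hmod : k % 2 == 0 := by
          have : k % 2 = 0 := by omega
          simp [this]
        simp only [hmod, if_true, hk2]
        have h1 : (Nat.fib k : Int) = Nat.fib m * (2 * Nat.fib (m + 1) - Nat.fib m) := by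
          have := Nat.fib_two_mul m
          have hk : k = 2 * m := by omega
          rw [hk, this]
          have : Nat.fib m ≤ 2 * Nat.fib (m + 1) :=
            le_trans (Nat.fib_le_fib_succ) (by omega)
          push_cast [this]; ring
        have h2 : (Nat.fib (k + 1) : Int) = Nat.fib m * Nat.fib m + Nat.fib (m + 1) * Nat.fib (m + 1) := by
          have := Nat.fib_two_mul_add_one m
          have hk : k + 1 = 2 * m + 1 := by omega
          rw [hk, this]; push_cast; ring
        simp [h1, h2]
      · obtain ⟨m, hm⟩ := ho
        have hk2 : k / 2 = m := by omega
        have hmod : (k % 2 == 0) = false := by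
          have : k % 2 = 1 := by omega
          simp [this]
        simp only [hmod, if_false, hk2]
        have h1 : (Nat.fib k : Int) = Nat.fib m * Nat.fib m + Nat.fib (m + 1) * Nat.fib (m + 1) := by
          have := Nat.fib_two_mul_add_one m
          rw [hm, this]; push_cast; ring
        have h2 : (Nat.fib (k + 1) : Int)
            = Nat.fib m * (2 * Nat.fib (m + 1) - Nat.fib m)
              + (Nat.fib m * Nat.fib m + Nat.fib (m + 1) * Nat.fib (m + 1)) := by
          have hk : k + 1 = 2 * m + 2 := by omega
          have hsplit : (Nat.fib (2 * m + 2) : Int)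
              = (Nat.fib (2 * m) : Int) + (Nat.fib (2 * m + 1) : Int) := by
            rw [Nat.fib_add_two]; push_cast; ring
          have hle2 : Nat.fib m ≤ 2 * Nat.fib (m + 1) :=
            le_trans (Nat.fib_le_fib_succ) (by omega)
          rw [hk, hsplit, Nat.fib_two_mul, Nat.fib_two_mul_add_one]
          push_cast [hle2]; ring
        simp [h1, h2]

theorem fibAux_closed (a b : Int) : ∀ (k : Nat),
    fibAux a b k = a * ((Nat.fib (k + 1) : Int) - (Nat.fib k : Int)) + b * (Nat.fib k : Int) := by
  intro k
  induction k using Nat.strong_induction_on with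
  | _ k ih =>
    match k with
    | 0 => simp [fibAux]
    | 1 => simp [fibAux]
    | (j + 2) =>
        have h1 := ih j (by omega)
        have h2 := ih (j + 1) (by omega)
        show fibAux a b j + fibAux a b (j + 1) = _
        rw [h1, h2]
        have f1 : (Nat.fib (j + 2) : Int) = Nat.fib j + Nat.fib (j + 1) := by
          rw [Nat.fib_add_two]; push_cast; ring
        have f2 : (Nat.fib (j + 3) : Int) = Nat.fib (j + 1) + Nat.fib (j + 2) := by
          rw [show j + 3 = (j + 1) + 2 by omega, Nat.fib_add_two]; push_cast; ring
        rw [show j + 2 + 1 = j + 3 by omega, f2, f1]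
        ring

theorem fib_term_eq_fibAux (a b : Int) (k : Nat) : fib_term a b k = fibAux a b k := by
  rw [fib_term, fib_pair_eq, fibAux_closed]

-- ===== VERDICT (by name: the statement is the Claim_ definition above) =====
theorem fibonacci_like_sequence_spec : Claim_equal_fibonacci_like_sequence := by
  intro n _
  unfold Spec_fibonacci_like_sequence fibonacci_like_sequence fibonacci_like_sequence_alt
  rw [PySem.List.pyRange_one]
  simp only [List.foldl_map, List.map_map, Int.sub_zero, Int.zero_add]
  rw [fibAux_A_fold n (next_prime n) n.toNat]
  apply List.map_congr_left
  intro k _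
  simp [Function.comp, fib_term_eq_fibAux]
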